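-- pv_equiv track=rewrite | github.com/MichaelMalcev/MichaelMalcev | 23/20198.py | f
-- ===== SOURCE A (Python) =====
-- def f(x, y, z):
--     if x > y+2:
--         return 0
--     if x == y:
--         return 1
--     if x <= y+2:
--         if z[-2:] == "AA":
--             return f(x + 5, y, z + "B") + f(x * 2, y, z + "C")
--         else:
--             return f(x - 1, y, z + "A") + f(x + 5, y, z + "B") + f(x * 2, y, z + "C")
-- ===== SOURCE B (Python) =====
-- def f(x, y, z):
--     # memoized DFS on the reduced state (x, number of trailing 'A's capped at 2); y is constant
--     t = 2 if z.endswith("AA") else (1 if z.endswith("A") else 0)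
--     memo = {}
--     def go(x, t):
--         if x > y + 2:
--             return 0
--         if x == y:
--             return 1
--         key = (x, t)
--         if key in memo:
--             return memo[key]
--         if t == 2:
--             r = go(x + 5, 0) + go(2 * x, 0)
--         else:
--             r = go(x - 1, min(t + 1, 2)) + go(x + 5, 0) + go(2 * x, 0)
--         memo[key] = r
--         return r
--     return go(x, t)
-- ===== Notes on version B (the rewrite author's own statement) =====
-- stated objective: alternative
-- what changed: A's three-way branching recursion on (x, z) is replaced by a memoized DFS over the reduced state (x, trailing-'A' count of z capped at 2); y is constant and z only matters through that class, so each state is solved once.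
import Mathlib
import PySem

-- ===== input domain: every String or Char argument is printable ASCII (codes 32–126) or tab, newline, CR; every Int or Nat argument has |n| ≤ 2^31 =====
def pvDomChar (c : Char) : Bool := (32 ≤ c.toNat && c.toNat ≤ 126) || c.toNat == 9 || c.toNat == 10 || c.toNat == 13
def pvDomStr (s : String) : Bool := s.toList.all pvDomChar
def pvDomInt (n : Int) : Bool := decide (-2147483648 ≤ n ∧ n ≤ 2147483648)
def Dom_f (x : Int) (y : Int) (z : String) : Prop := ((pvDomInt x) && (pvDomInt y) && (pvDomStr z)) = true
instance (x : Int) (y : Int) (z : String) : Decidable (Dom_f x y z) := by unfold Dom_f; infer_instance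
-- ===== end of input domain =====

-- B replaces A's branching recursion on (x, z) by a memoized DFS on the reduced state
-- (x, number of trailing 'A's of z capped at 2) — y is constant and z only matters through
-- that class, so each state is solved once. Equivalence is about the return value;
-- neither version mutates its arguments.

-- ===== PORT A =====
-- fuel-based transliteration of A's recursion (the fuel guard only makes it total; on every
-- input admitted by Pre_f the fuel pvFuel x y is proved sufficient below)
def fA : Nat → Int → Int → List Char → Option Int
  | 0, _, _, _ => none
  | n+1, x, y, z =>
    if x > y + 2 then some 0
    else if x = y then some 1
    else if x ≤ y + 2 then
      (if PySem.List.slice z (some (-2)) none = ['A', 'A'] then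
        match fA n (x + 5) y (z ++ ['B']), fA n (x * 2) y (z ++ ['C']) with
        | some b, some c => some (b + c)
        | _, _ => none
      else
        match fA n (x - 1) y (z ++ ['A']), fA n (x + 5) y (z ++ ['B']), fA n (x * 2) y (z ++ ['C']) with
        | some a, some b, some c => some (a + b + c)
        | _, _, _ => none)
    else none  -- unreachable (x ≤ y+2 holds whenever the first test fails)

-- fuel sufficient on every input Pre_f admits (proved below); any larger fuel gives the same value
def pvFuel (x : Int) (y : Int) : Nat := (3 * (y + 3 - x)).toNat + 20

def f (x : Int) (y : Int) (z : String) : Int := (fA (pvFuel x y) x y z.toList).getD 0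

-- ===== PORT B =====
-- fB fuel y x t memo: B's memoized DFS `go` on state (x, t); returns (value, memo)
def fB : Nat → Int → Int → Int → PySem.Dict (Int × Int) Int → Option (Int × PySem.Dict (Int × Int) Int)
  | 0, _, _, _, _ => none
  | n+1, y, x, t, m =>
    if x > y + 2 then some (0, m)
    else if x = y then some (1, m)
    else
      match PySem.Dict.get? m (x, t) with
      | some v => some (v, m)
      | none =>
        if t = 2 then
          match fB n y (x + 5) 0 m with
          | none => none
          | some (b, m1) =>
            match fB n y (2 * x) 0 m1 with
            | none => none
            | some (c, m2) => some (b + c, PySem.Dict.insert m2 (x, t) (b + c))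
        else
          match fB n y (x - 1) (min (t + 1) 2) m with
          | none => none
          | some (a, m1) =>
            match fB n y (x + 5) 0 m1 with
            | none => none
            | some (b, m2) =>
              match fB n y (2 * x) 0 m2 with
              | none => none
              | some (c, m3) => some (a + b + c, PySem.Dict.insert m3 (x, t) (a + b + c))

def f_alt (x : Int) (y : Int) (z : String) : Int :=
  let t : Int :=
    if PySem.Str.endswith z "AA" then 2
    else if PySem.Str.endswith z "A" then 1 else 0
  ((fB (pvFuel x y) y x t PySem.Dict.empty).map Prod.fst).getD 0

-- ===== PRECONDITION & SPEC =====
-- tc z = number of trailing 'A's of z, capped at 2 (the only part of z the recursion reads)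
def tc (z : List Char) : Int :=
  match z.reverse with
  | [] => 0
  | c :: rest => if c = 'A' then (if rest.head? = some 'A' then 2 else 1) else 0

-- Pre_f is exactly the set of inputs on which the Python A returns: outside it A's recursion
-- is not well-founded (the x-1 / x*2 branches descend forever) and A ends in RecursionError.
-- Besides the two base cases and the main band x ≥ 5 - tc(z), finitely many small states
-- below the band terminate because a base case intercepts every path; they are listed exactly.
def Pre_f (x : Int) (y : Int) (z : String) : Prop :=
  x > y + 2 ∨ x = y ∨
  (x ≤ y + 2 ∧ x ≠ y ∧
    (5 - tc z.toList ≤ x ∨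
     (y = 4 ∧ ((x = 3 ∧ 1 ≤ tc z.toList) ∨ (x = 2 ∧ tc z.toList = 2))) ∨
     (y = 3 ∧ (x = 4 ∨ (x = 2 ∧ tc z.toList = 2))) ∨
     (y = 2 ∧ (x = 3 ∨ x = 4 ∨ (x = 1 ∧ tc z.toList = 2))) ∨
     (y = 1 ∧ (x = 2 ∨ x = 3)) ∨
     (y = 0 ∧ x = 2 ∧ tc z.toList = 2) ∨
     (y = -1 ∧ x = 1 ∧ tc z.toList = 2) ∨
     (y = -2 ∧ x = -1) ∨
     (y = -4 ∧ x = -2 ∧ tc z.toList = 2)))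
instance (x : Int) (y : Int) (z : String) : Decidable (Pre_f x y z) := by unfold Pre_f; infer_instance

def pvWitness_f : Int × Int × String := (5, 10, "")

def Spec_f (x : Int) (y : Int) (z : String) (out : Int) : Prop := out = f_alt x y z
instance (x : Int) (y : Int) (z : String) (out : Int) : Decidable (Spec_f x y z out) := by unfold Spec_f; infer_instance

-- ===== CLAIM (what is proved, stated in full; the proofs are below) =====
def Claim_equal_f : Prop := ∀ (x : Int) (y : Int) (z : String), Dom_f x y z → Pre_f x y z → Spec_f x y z (f x y z)

-- ===== LEMMAS AND PROOFS =====

-- gA: A's recursion with z abstracted to its trailing-'A' class t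
def gA : Nat → Int → Int → Int → Option Int
  | 0, _, _, _ => none
  | n+1, y, x, t =>
    if x > y + 2 then some 0
    else if x = y then some 1
    else if x ≤ y + 2 then
      (if t = 2 then
        match gA n y (x + 5) 0, gA n y (x * 2) 0 with
        | some b, some c => some (b + c)
        | _, _ => none
      else
        match gA n y (x - 1) (min (t + 1) 2), gA n y (x + 5) 0, gA n y (x * 2) 0 with
        | some a, some b, some c => some (a + b + c)
        | _, _, _ => none)
    else none

theorem tc_cases (z : List Char) : tc z = 0 ∨ tc z = 1 ∨ tc z = 2 := by
  rcases h : z.reverse with _ | ⟨c, r⟩ <;> simp [tc, h] <;> split_ifs <;> tauto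

theorem tc_append_A (z : List Char) : tc (z ++ ['A']) = min (tc z + 1) 2 := by
  rcases h : z.reverse with _ | ⟨c, r⟩ <;> simp [tc, List.reverse_append, h] <;>
    split_ifs <;> simp_all <;> omega

theorem tc_append_B (z : List Char) : tc (z ++ ['B']) = 0 := by
  simp [tc, List.reverse_append]

theorem tc_append_C (z : List Char) : tc (z ++ ['C']) = 0 := by
  simp [tc, List.reverse_append]

theorem slice_AA_iff (z : List Char) :
    (PySem.List.slice z (some (-2)) none = ['A', 'A']) ↔ tc z = 2 := by
  rw [PySem.List.slice_from_neg_ofNat z 2 (by omega)]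
  rcases h : z.reverse with _ | ⟨c, _ | ⟨d, r⟩⟩
  · have hz : z = [] := by simpa using congrArg List.reverse h
    subst hz; simp [tc]
  · have hz : z = [c] := by simpa using congrArg List.reverse h
    subst hz; simp [tc]; split_ifs <;> simp
  · have hz : z = r.reverse ++ [d, c] := by
      have := congrArg List.reverse h; simpa using this
    subst hz
    have hlen : (r.reverse ++ [d, c]).length - 2 = r.reverse.length := by simp
    rw [hlen, List.drop_left]
    have hrev : (r.reverse ++ [d, c]).reverse = c :: d :: r := by simp
    simp only [tc, hrev]
    constructor
    · rintro h'; simp at h'; simp [h'.1, h'.2]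
    · intro h'; split_ifs at h' with h1 h2 <;> simp_all

theorem endswith_tc (z : String) :
    (if PySem.Str.endswith z "AA" then (2:Int)
     else if PySem.Str.endswith z "A" then 1 else 0) = tc z.toList := by
  have hAA : PySem.Str.endswith z "AA" = true ↔ ['A','A'] <+: z.toList.reverse := by
    rw [PySem.Str.endswith_eq, PySem.Chars.endswith_iff]
    exact ⟨fun h => List.reverse_prefix.mpr h, fun h => List.reverse_prefix.mp (by simpa using h)⟩
  have hA : PySem.Str.endswith z "A" = true ↔ ['A'] <+: z.toList.reverse := by
    rw [PySem.Str.endswith_eq, PySem.Chars.endswith_iff]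
    exact ⟨fun h => List.reverse_prefix.mpr h, fun h => List.reverse_prefix.mp (by simpa using h)⟩
  rcases h : z.toList.reverse with _ | ⟨c, _ | ⟨d, r⟩⟩ <;>
    simp only [tc, h] <;> split_ifs <;> simp_all [List.cons_prefix_cons] <;> tauto

theorem fA_eq_gA (n : Nat) (y : Int) : ∀ (x : Int) (z : List Char),
    fA n x y z = gA n y x (tc z) := by
  induction n with
  | zero => intro x z; simp [fA, gA]
  | succ n ih =>
    intro x z
    simp only [fA, gA, slice_AA_iff]
    rw [ih (x + 5) (z ++ ['B']), ih (x * 2) (z ++ ['C']), ih (x - 1) (z ++ ['A'])]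
    rw [tc_append_A, tc_append_B, tc_append_C]

theorem gA_mono {n : Nat} {y x t v : Int} (h : gA n y x t = some v) :
    gA (n + 1) y x t = some v := by
  induction n generalizing x t v with
  | zero => simp [gA] at h
  | succ n ih =>
    rw [gA] at h ⊢
    split_ifs at h ⊢ <;> try assumption
    · rcases hb : gA n y (x + 5) 0 with _ | b <;> rcases hc : gA n y (x * 2) 0 with _ | c <;>
        simp [hb, hc] at h
      rw [ih hb, ih hc]; simpa using h
    · rcases ha : gA n y (x - 1) (min (t + 1) 2) with _ | a <;>
        rcases hb : gA n y (x + 5) 0 with _ | b <;>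
        rcases hc : gA n y (x * 2) 0 with _ | c <;> simp [ha, hb, hc] at h
      rw [ih ha, ih hb, ih hc]; simpa using h

theorem gA_mono_le {n m : Nat} {y x t v : Int} (hnm : n ≤ m) (h : gA n y x t = some v) :
    gA m y x t = some v := by
  induction m with
  | zero => have hn : n = 0 := by omega
            subst hn; exact h
  | succ m ih =>
    rcases Nat.lt_or_ge n (m+1) with hlt | hge
    · exact gA_mono (ih (by omega))
    · have hn : n = m + 1 := by omega
      subst hn; exact h

theorem gA_det {n m : Nat} {y x t v w : Int} (h1 : gA n y x t = some v)
    (h2 : gA m y x t = some w) : v = w := by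
  rcases Nat.le_total n m with h | h
  · have h' := gA_mono_le h h1
    exact Option.some_inj.mp (h'.symm.trans h2)
  · have h' := gA_mono_le h h2
    exact Option.some_inj.mp (h1.symm.trans h')

-- memo invariant: every stored value is the (fuel-independent) value of its state
def MemoInv (y : Int) (m : PySem.Dict (Int × Int) Int) : Prop :=
  ∀ x t v, PySem.Dict.get? m (x, t) = some v → ∃ n, gA n y x t = some v

theorem MemoInv_empty (y : Int) : MemoInv y PySem.Dict.empty := by
  intro x t v h
  simp [PySem.Dict.empty, PySem.Dict.get?] at h

theorem MemoInv_insert {y : Int} {m : PySem.Dict (Int × Int) Int} (hm : MemoInv y m)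
    {x t v : Int} {n : Nat} (hv : gA n y x t = some v) :
    MemoInv y (PySem.Dict.insert m (x, t) v) := by
  intro x' t' v' h
  by_cases hk : (x', t') = (x, t)
  · rw [hk, PySem.Dict.get?_insert_self] at h
    injection hk with hx ht
    injection h with hvv
    subst hx; subst ht; subst hvv
    exact ⟨n, hv⟩
  · rw [PySem.Dict.get?_insert_of_ne _ _ hk] at h
    exact hm x' t' v' h

theorem fB_sim (n : Nat) (y : Int) : ∀ (x t v : Int) (m : PySem.Dict (Int × Int) Int),
    MemoInv y m → gA n y x t = some v →
    ∃ m', fB n y x t m = some (v, m') ∧ MemoInv y m' := by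
  induction n with
  | zero => intro x t v m _ h; simp [gA] at h
  | succ n ih =>
    intro x t v m hm h
    rw [gA] at h
    rw [fB]
    by_cases h1 : x > y + 2
    · simp only [if_pos h1] at h
      injection h with hv; subst hv
      exact ⟨m, by simp [h1], hm⟩
    by_cases h2 : x = y
    · simp only [if_neg h1, if_pos h2] at h
      injection h with hv; subst hv
      exact ⟨m, by simp [h1, h2], hm⟩
    have h3 : x ≤ y + 2 := by omega
    simp only [if_neg h1, if_neg h2, if_pos h3] at h
    simp only [if_neg h1, if_neg h2]
    rcases hg : PySem.Dict.get? m (x, t) with _ | w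
    · by_cases ht : t = 2
      · simp only [if_pos ht] at h ⊢
        rcases hb : gA n y (x + 5) 0 with _ | b <;> rcases hc : gA n y (x * 2) 0 with _ | c <;>
          simp [hb, hc] at h
        obtain ⟨m1, hm1, hi1⟩ := ih (x + 5) 0 b m hm hb
        obtain ⟨m2, hm2, hi2⟩ := ih (x * 2) 0 c m1 hi1 hc
        refine ⟨PySem.Dict.insert m2 (x, t) (b + c), ?_, ?_⟩
        · have h2x : (2 : Int) * x = x * 2 := by ring
          simp only [hm1, h2x, hm2, ← h]
        · have hall : gA (n + 1) y x t = some v := by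
            rw [gA]; simp [if_neg h1, if_neg h2, if_pos h3, if_pos ht, hb, hc, ← h]
          rw [← h] at hall
          exact MemoInv_insert hi2 hall
      · simp only [if_neg ht] at h ⊢
        rcases ha : gA n y (x - 1) (min (t + 1) 2) with _ | a <;>
          rcases hb : gA n y (x + 5) 0 with _ | b <;>
          rcases hc : gA n y (x * 2) 0 with _ | c <;> simp [ha, hb, hc] at h
        obtain ⟨m1, hm1, hi1⟩ := ih (x - 1) (min (t + 1) 2) a m hm ha
        obtain ⟨m2, hm2, hi2⟩ := ih (x + 5) 0 b m1 hi1 hb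
        obtain ⟨m3, hm3, hi3⟩ := ih (x * 2) 0 c m2 hi2 hc
        refine ⟨PySem.Dict.insert m3 (x, t) (a + b + c), ?_, ?_⟩
        · have h2x : (2 : Int) * x = x * 2 := by ring
          simp only [hm1, hm2, h2x, hm3, ← h]
        · have hall : gA (n + 1) y x t = some v := by
            rw [gA]; simp [if_neg h1, if_neg h2, if_pos h3, if_neg ht, ha, hb, hc, ← h]
          rw [← h] at hall
          exact MemoInv_insert hi3 hall
    · obtain ⟨k, hk⟩ := hm x t w hg
      have hall : gA (n + 1) y x t = some v := by
        rw [gA]; simp [if_neg h1, if_neg h2, if_pos h3, h]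
      have : w = v := gA_det hk hall
      exact ⟨m, by simp [this], hm⟩

-- fuel adequacy on the main band x ≥ 5 - t (any y): measure 3*(y+3-x) + 4*(2-t)
theorem gA_adeq (n : Nat) (y : Int) : ∀ (x t : Int), 0 ≤ t → t ≤ 2 → 5 - t ≤ x → 0 < n →
    3 * (y + 3 - x) + 4 * (2 - t) < n → ∃ v, gA n y x t = some v := by
  induction n with
  | zero => intro x t h0 h2 h5 hn hφ; omega
  | succ n ih =>
    intro x t h0 h2 h5 hn hφ
    rw [gA]
    by_cases h1 : x > y + 2
    · exact ⟨0, by simp [h1]⟩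
    by_cases hxy : x = y
    · exact ⟨1, by simp [h1, hxy]⟩
    have h3 : x ≤ y + 2 := by omega
    simp only [if_neg h1, if_neg hxy, if_pos h3]
    by_cases ht : t = 2
    · obtain ⟨b, hb⟩ := ih (x + 5) 0 (by omega) (by omega) (by omega) (by omega) (by omega)
      obtain ⟨c, hc⟩ := ih (x * 2) 0 (by omega) (by omega) (by omega) (by omega) (by omega)
      exact ⟨b + c, by simp [if_pos ht, hb, hc]⟩
    · obtain ⟨a, ha⟩ := ih (x - 1) (min (t + 1) 2) (by omega) (by omega) (by omega) (by omega) (by omega)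
      obtain ⟨b, hb⟩ := ih (x + 5) 0 (by omega) (by omega) (by omega) (by omega) (by omega)
      obtain ⟨c, hc⟩ := ih (x * 2) 0 (by omega) (by omega) (by omega) (by omega) (by omega)
      exact ⟨a + b + c, by simp [if_neg ht, ha, hb, hc]⟩

theorem gA_base (n : Nat) (y x t : Int) (hn : 1 ≤ n) (h : x > y + 2 ∨ x = y) :
    ∃ v, gA n y x t = some v := by
  rcases n with _ | n
  · omega
  · rcases h with h | h
    · exact ⟨0, by rw [gA]; simp [h]⟩
    · rcases lt_or_ge (y + 2) x with h' | h'
      · exact ⟨0, by rw [gA]; simp [h']⟩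
      · exact ⟨1, by rw [gA]; simp [h, show ¬ x > y + 2 by omega]⟩

theorem exc_total {y x t : Int} (h : (gA 4 y x t).isSome = true) {n : Nat} (hn : 4 ≤ n) :
    ∃ v, gA n y x t = some v := by
  rcases hv : gA 4 y x t with _ | v
  · rw [hv] at h; simp at h
  · exact ⟨v, gA_mono_le hn hv⟩

theorem pvFuel_ge (x y : Int) : 20 ≤ pvFuel x y := by
  unfold pvFuel; omega

theorem gA_total_of_pre (x y : Int) (z : String) (hp : Pre_f x y z) :
    ∃ v, gA (pvFuel x y) y x (tc z.toList) = some v := by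
  have h20 := pvFuel_ge x y
  rcases hp with h | h | ⟨hle, hne, hband | hexc⟩
  · exact gA_base _ y x _ (by omega) (Or.inl h)
  · exact gA_base _ y x _ (by omega) (Or.inr h)
  · -- main band: the measure fits under pvFuel
    have htc := tc_cases z.toList
    apply gA_adeq _ y x (tc z.toList) (by omega) (by omega) hband (by omega)
    have hpos : 0 ≤ 3 * (y + 3 - x) := by omega
    have : ((3 * (y + 3 - x)).toNat : Int) = 3 * (y + 3 - x) := Int.toNat_of_nonneg hpos
    unfold pvFuel
    push_cast
    omega
  · -- exceptional small states: each is decided at fuel 4 and lifted to pvFuel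
    have h4 : 4 ≤ pvFuel x y := by omega
    have lift : ∀ t' : Int, tc z.toList = t' → (gA 4 y x t').isSome = true →
        ∃ v, gA (pvFuel x y) y x (tc z.toList) = some v := by
      intro t' htt hd
      rw [htt]; exact exc_total hd h4
    have htc := tc_cases z.toList
    rcases hexc with ⟨hy, ⟨hx, ht⟩ | ⟨hx, ht⟩⟩ | ⟨hy, hx | ⟨hx, ht⟩⟩ |
      ⟨hy, hx | hx | ⟨hx, ht⟩⟩ | ⟨hy, hx | hx⟩ | ⟨hy, hx, ht⟩ | ⟨hy, hx, ht⟩ |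
      ⟨hy, hx⟩ | ⟨hy, hx, ht⟩ <;> subst hy <;> subst hx <;>
      rcases htc with h' | h' | h' <;>
      first
        | (exfalso; omega)
        | exact lift _ h' (by decide)

-- ===== VERDICT (by name: the statement is the Claim_ definition above) =====
theorem f_spec : Claim_equal_f := by
  intro x y z _ hp
  unfold Spec_f f f_alt
  obtain ⟨v, hv⟩ := gA_total_of_pre x y z hp
  rw [fA_eq_gA, hv, endswith_tc]
  obtain ⟨m', hm', _⟩ := fB_sim (pvFuel x y) y x (tc z.toList) v PySem.Dict.empty (MemoInv_empty y) hv
  simp [hm']
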